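-- pv_equiv track=rewrite | github.com/helsasp/SilverConnectPPL | DesignPattern/facade/activity_facade.py | _get_recommended_activities
-- ===== SOURCE A (Python) =====
-- from typing import Dict, List, Optional
--
-- def _get_recommended_activities(user_interests: List[str], activities: List[Dict]) -> List[Dict]:
--     """Dapatkan aktivitas yang sesuai dengan minat user"""
--
--     interest_mapping = {
--         "berkebun": ["hobi"],
--         "memasak": ["hobi"],
--         "yoga": ["olahraga", "kesehatan"],
--         "seni": ["kreatif"],
--         "jalan kaki": ["olahraga"],
--         "olahraga": ["olahraga"]
--     }
--
--     recommended_categories = set()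
--     for interest in user_interests:
--         categories = interest_mapping.get(interest, [])
--         recommended_categories.update(categories)
--
--     return [activity for activity in activities
--             if activity["category"] in recommended_categories]
-- ===== SOURCE B (Python) =====
-- from typing import Dict, List
--
-- def _get_recommended_activities(user_interests: List[str], activities: List[Dict]) -> List[Dict]:
--     """Dapatkan aktivitas yang sesuai dengan minat user"""
--
--     # inverted index: category -> the interests that map to it
--     category_to_interests = {
--         "hobi": ["berkebun", "memasak"],
--         "olahraga": ["yoga", "jalan kaki", "olahraga"],
--         "kesehatan": ["yoga"],
--         "kreatif": ["seni"],
--     }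
--
--     result = []
--     for activity in activities:
--         for interest in category_to_interests.get(activity["category"], []):
--             if interest in user_interests:
--                 result.append(activity)
--                 break
--     return result
-- ===== Notes on version B (the rewrite author's own statement) =====
-- stated objective: alternative
-- what changed: Replaced the precomputed recommended-categories set with a hard-coded inverted index (category -> interests); B loops over activities and includes one as soon as some interest from its category's inverted list occurs in user_interests (inner loop with break).
import Mathlib
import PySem

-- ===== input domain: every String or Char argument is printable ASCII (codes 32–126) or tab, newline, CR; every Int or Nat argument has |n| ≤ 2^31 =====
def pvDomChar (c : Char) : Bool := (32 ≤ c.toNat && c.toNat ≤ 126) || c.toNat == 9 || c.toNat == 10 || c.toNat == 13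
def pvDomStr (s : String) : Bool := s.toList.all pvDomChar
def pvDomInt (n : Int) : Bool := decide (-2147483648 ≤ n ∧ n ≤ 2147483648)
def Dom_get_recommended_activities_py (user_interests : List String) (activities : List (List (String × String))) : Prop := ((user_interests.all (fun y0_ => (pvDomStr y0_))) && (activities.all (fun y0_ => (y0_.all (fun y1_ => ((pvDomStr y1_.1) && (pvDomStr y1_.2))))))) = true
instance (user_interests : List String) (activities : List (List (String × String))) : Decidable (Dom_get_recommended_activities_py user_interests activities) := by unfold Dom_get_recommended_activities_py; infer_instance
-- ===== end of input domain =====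

-- B replaces the precomputed recommended-categories set by a hard-coded inverted index (category -> interests) and an activity loop with an inner break; alternative decomposition, same results.


-- ===== PORT A =====
def pvMappingA : PySem.Dict String (List String) :=
  PySem.Dict.mk [("berkebun", ["hobi"]), ("memasak", ["hobi"]), ("yoga", ["olahraga", "kesehatan"]),
   ("seni", ["kreatif"]), ("jalan kaki", ["olahraga"]), ("olahraga", ["olahraga"])]

-- build recommended_categories as a set, then one filtering pass; activity["category"] is total only under Pre_ (getD "" used as the total form there)
def get_recommended_activities_py (user_interests : List String) (activities : List (List (String × String))) : List (List (String × String)) :=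
  let recommended_categories : PySem.Set String :=
    user_interests.foldl (fun s interest => PySem.Set.update s (PySem.Dict.getD pvMappingA interest [])) PySem.Set.empty
  activities.filter (fun activity => PySem.Set.contains recommended_categories (PySem.Dict.getD (PySem.Dict.mk activity) "category" ""))

-- ===== PORT B =====
-- inverted index: category -> the interests that map to it
def pvInvB : PySem.Dict String (List String) :=
  PySem.Dict.mk [("hobi", ["berkebun", "memasak"]), ("olahraga", ["yoga", "jalan kaki", "olahraga"]),
   ("kesehatan", ["yoga"]), ("kreatif", ["seni"])]

-- the inner 'for interest in …: if interest in user_interests: append; break' — returns whether the append fired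
def pvInnerB (interests : List String) (ui : List String) : Bool :=
  match interests with
  | [] => false
  | i :: rest => if ui.contains i then true else pvInnerB rest ui

-- outer loop over activities with a result accumulator
def get_recommended_activities_py_alt (user_interests : List String) (activities : List (List (String × String))) : List (List (String × String)) :=
  activities.foldl
    (fun result activity =>
      if pvInnerB (PySem.Dict.getD pvInvB (PySem.Dict.getD (PySem.Dict.mk activity) "category" "") []) user_interests
      then result ++ [activity] else result)
    []

-- ===== PRECONDITION & SPEC =====
-- Pre_ excludes activities missing the "category" key, on which activity["category"] raises KeyError in both A and B.
def Pre_get_recommended_activities_py (user_interests : List String) (activities : List (List (String × String))) : Prop :=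
  ∀ a ∈ activities, PySem.Dict.contains (PySem.Dict.mk a) "category" = true
instance (user_interests : List String) (activities : List (List (String × String))) : Decidable (Pre_get_recommended_activities_py user_interests activities) := by unfold Pre_get_recommended_activities_py; infer_instance

def pvWitness_get_recommended_activities_py : List String × (List (List (String × String))) :=
  (["yoga", "seni"], [[("category", "olahraga")], [("category", "hobi"), ("name", "x")]])

def Spec_get_recommended_activities_py (user_interests : List String) (activities : List (List (String × String))) (out : List (List (String × String))) : Prop := out = get_recommended_activities_py_alt user_interests activities
instance (user_interests : List String) (activities : List (List (String × String))) (out : List (List (String × String))) : Decidable (Spec_get_recommended_activities_py user_interests activities out) := by unfold Spec_get_recommended_activities_py; infer_instance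

-- ===== CLAIM (what is proved, stated in full; the proofs are below) =====
def Claim_equal_get_recommended_activities_py : Prop := ∀ (user_interests : List String) (activities : List (List (String × String))), Dom_get_recommended_activities_py user_interests activities → Pre_get_recommended_activities_py user_interests activities → Spec_get_recommended_activities_py user_interests activities (get_recommended_activities_py user_interests activities)

-- ===== LEMMAS AND PROOFS =====

-- membership in the set A accumulates  ⟺  some interest's mapped list contains the category
lemma pv_mem_fold_update (ui : List String) (s : PySem.Set String) (c : String) :
    (c ∈ ui.foldl (fun s interest => PySem.Set.update s (PySem.Dict.getD pvMappingA interest [])) s)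
    ↔ c ∈ s ∨ ∃ i ∈ ui, c ∈ PySem.Dict.getD pvMappingA i [] := by
  induction ui generalizing s with
  | nil => simp
  | cons x xs ih =>
    simp only [List.foldl_cons, ih, PySem.Set.mem_update, List.mem_cons]
    constructor
    · rintro (h | h)
      · rcases h with h | h
        · exact Or.inl h
        · exact Or.inr ⟨x, Or.inl rfl, h⟩
      · rcases h with ⟨i, hi, hc⟩
        exact Or.inr ⟨i, Or.inr hi, hc⟩
    · rintro (h | ⟨i, hi | hi, hc⟩)
      · exact Or.inl (Or.inl h)
      · exact Or.inl (Or.inr (hi ▸ hc))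
      · exact Or.inr ⟨i, hi, hc⟩

-- the inverted index is correct: interest i maps to category c  ⟺  c's inverted list holds i
lemma pv_inv_correct (c i : String) :
    i ∈ PySem.Dict.getD pvInvB c [] ↔ c ∈ PySem.Dict.getD pvMappingA i [] := by
  simp only [pvInvB, pvMappingA, PySem.Dict.getD_eq_get?_getD, PySem.Dict.get?_mk_cons]
  split_ifs <;> simp_all [PySem.Dict.get?] <;> subst_vars <;> (try simp_all) <;> simp_all [ne_comm]

-- the inner break-loop is a disjunction over the interests list
lemma pv_inner_eq_any (l ui : List String) :
    pvInnerB l ui = l.any (fun i => ui.contains i) := by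
  induction l with
  | nil => rfl
  | cons x xs ih => simp [pvInnerB, ih]

-- A's set-membership test equals B's inverted-index test, for every category string
lemma pv_test_eq (ui : List String) (c : String) :
    PySem.Set.contains (ui.foldl (fun s interest => PySem.Set.update s (PySem.Dict.getD pvMappingA interest [])) PySem.Set.empty) c
    = pvInnerB (PySem.Dict.getD pvInvB c []) ui := by
  rw [pv_inner_eq_any]
  rcases Bool.eq_false_or_eq_true ((PySem.Dict.getD pvInvB c []).any (fun i => ui.contains i)) with h | h
  · rw [h, PySem.Set.contains_iff, pv_mem_fold_update]
    rw [List.any_eq_true] at h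
    obtain ⟨i, hmem, hui⟩ := h
    exact Or.inr ⟨i, by simpa [List.contains_iff_mem] using hui, (pv_inv_correct c i).mp hmem⟩
  · rw [h, Bool.eq_false_iff, Ne, PySem.Set.contains_iff, pv_mem_fold_update]
    rw [List.any_eq_false] at h
    push_neg
    refine ⟨by simp [PySem.Set.empty], fun i hi hc => ?_⟩
    have := h i ((pv_inv_correct c i).mpr hc)
    simp [hi] at this

-- ===== VERDICT (by name: the statement is the Claim_ definition above) =====
theorem get_recommended_activities_py_spec : Claim_equal_get_recommended_activities_py := by
  intro ui acts _ _
  unfold Spec_get_recommended_activities_py get_recommended_activities_py get_recommended_activities_py_alt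
  rw [PySem.List.foldl_append_if]
  simp only [List.nil_append, List.map_id']
  exact List.filter_congr (fun a _ => pv_test_eq ui (PySem.Dict.getD (PySem.Dict.mk a) "category" ""))
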